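-- pv_equiv track=rewrite | github.com/PanGDX/Auto-GPT-and-Upload | utility.py | position_of_next_line
-- ===== SOURCE A (Python) =====
-- def position_of_next_line(
--     all_sentence_ending, speech_ending, speech_start, length_of_message
-- ):
--     """
--     Finds the position of the next newline character in a text, excluding those within speech marks.
--
--     The function iterates through positions of all newline characters (sentence endings) and checks if they
--     are outside of speech marks. The closest newline character position, outside of speech marks and
--     after a specified index in the message, is then returned.
--
--     Parameters:
--     all_sentence_ending (list of int): A list of positions for all newline characters in the text.
--     speech_ending (list of int): A list of positions indicating the end of speech segments.
--     speech_start (list of int): A list of positions indicating the start of speech segments.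
--     length_of_message (int): The position in the text from which to search for the next newline character.
--
--     Returns:
--     int or None: The position of the closest newline character that is outside of speech marks and
--     after the specified index (length_of_message), or None if no such position exists.
--     """
--     # Initialize the variable to store the closest position of newline
--     closest_newline_pos = None
--
--     # Iterate through all newline characters
--     for newline_pos in all_sentence_ending:
--         # Check if the newline character is not within speech marks
--         in_speech = False
--         for start, end in zip(speech_start, speech_ending):
--             if start <= newline_pos <= end:
--                 in_speech = True
--                 break
--
--         # If the newline character is outside speech marks
--         if not in_speech:
--             # Calculate the difference from length of message
--             difference = newline_pos - length_of_message
--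
--             # Check if this is the closest newline character so far
--             if difference >= 0 and (
--                 closest_newline_pos is None
--                 or difference < closest_newline_pos - length_of_message
--             ):
--                 closest_newline_pos = newline_pos
--
--     return closest_newline_pos
-- ===== SOURCE B (Python) =====
-- def position_of_next_line(
--     all_sentence_ending, speech_ending, speech_start, length_of_message
-- ):
--     # Sort the speech intervals by start and the newline positions ascending,
--     # then sweep both lists once: while walking newlines in increasing order,
--     # advance an interval pointer and keep the max end among intervals whose
--     # start has been passed; the first unskipped newline not under that max
--     # end is the minimal qualifying position.
--     pairs = sorted(zip(speech_start, speech_ending), key=lambda q: q[0])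
--     max_end = None
--     i = 0
--     for p in sorted(all_sentence_ending):
--         if p < length_of_message:
--             continue
--         while i < len(pairs) and pairs[i][0] <= p:
--             if max_end is None or max_end < pairs[i][1]:
--                 max_end = pairs[i][1]
--             i += 1
--         if max_end is None or max_end < p:
--             return p
--     return None
-- ===== Notes on version B (the rewrite author's own statement) =====
-- stated objective: faster
-- what changed: Replaced the per-newline scan over all speech intervals by sorting intervals by start and newlines ascending once, then a single two-pointer sweep that maintains the running maximum interval end and returns the first uncovered newline at/after the index.
import Mathlib
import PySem

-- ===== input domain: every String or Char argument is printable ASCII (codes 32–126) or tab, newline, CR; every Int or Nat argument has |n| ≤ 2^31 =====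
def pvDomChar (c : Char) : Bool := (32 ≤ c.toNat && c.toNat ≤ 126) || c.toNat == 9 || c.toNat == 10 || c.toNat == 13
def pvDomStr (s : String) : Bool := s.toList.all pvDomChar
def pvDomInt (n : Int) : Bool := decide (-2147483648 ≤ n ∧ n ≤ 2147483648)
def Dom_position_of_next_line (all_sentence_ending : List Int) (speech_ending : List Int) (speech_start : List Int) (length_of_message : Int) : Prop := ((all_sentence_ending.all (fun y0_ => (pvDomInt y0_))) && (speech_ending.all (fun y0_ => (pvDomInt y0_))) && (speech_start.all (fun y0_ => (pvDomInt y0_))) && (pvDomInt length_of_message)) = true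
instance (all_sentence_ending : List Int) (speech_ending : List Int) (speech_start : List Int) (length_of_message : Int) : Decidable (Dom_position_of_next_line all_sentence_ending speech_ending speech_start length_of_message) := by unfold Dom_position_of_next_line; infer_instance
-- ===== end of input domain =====

-- B replaces A's per-newline scan over all intervals by a sorted two-pointer sweep (objective: faster).

-- ===== PORT A =====
def position_of_next_line (all_sentence_ending : List Int) (speech_ending : List Int) (speech_start : List Int) (length_of_message : Int) : Option Int :=
  all_sentence_ending.foldl (fun closest_newline_pos newline_pos =>
    -- inner for-loop with break = any over zip(speech_start, speech_ending)
    let in_speech := (List.zip speech_start speech_ending).any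
      (fun q => decide (q.1 ≤ newline_pos) && decide (newline_pos ≤ q.2))
    if in_speech then closest_newline_pos
    else
      let difference := newline_pos - length_of_message
      if (decide (0 ≤ difference) &&
          (match closest_newline_pos with
           | none => true
           | some c => decide (difference < c - length_of_message))) then
        some newline_pos
      else closest_newline_pos) none

-- ===== PORT B =====
-- the 'while i < len(pairs) and pairs[i][0] <= p' loop; the index i is represented
-- by the remaining suffix pairs[i:], the running max_end by an Option Int
def pvAdvance (p : Int) : List (Int × Int) → Option Int → List (Int × Int) × Option Int
  | [], max_end => ([], max_end)
  | q :: rest, max_end =>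
    if q.1 ≤ p then
      pvAdvance p rest
        (match max_end with
         | none => some q.2
         | some me => if me < q.2 then some q.2 else some me)
    else (q :: rest, max_end)

-- the 'for p in sorted(all_sentence_ending)' loop with early return
def pvSweep (length_of_message : Int) : List Int → List (Int × Int) → Option Int → Option Int
  | [], _, _ => none
  | p :: ps, rest, max_end =>
    if p < length_of_message then pvSweep length_of_message ps rest max_end
    else
      let st := pvAdvance p rest max_end
      if (match st.2 with | none => true | some me => decide (me < p)) then some p
      else pvSweep length_of_message ps st.1 st.2

def position_of_next_line_alt (all_sentence_ending : List Int) (speech_ending : List Int) (speech_start : List Int) (length_of_message : Int) : Option Int :=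
  pvSweep length_of_message
    (PySem.List.sorted all_sentence_ending (fun x => x) false)
    (PySem.List.sorted (List.zip speech_start speech_ending) (fun q => q.1) false)
    none

-- ===== PRECONDITION & SPEC =====
def Spec_position_of_next_line (all_sentence_ending : List Int) (speech_ending : List Int) (speech_start : List Int) (length_of_message : Int) (out : Option Int) : Prop := out = position_of_next_line_alt all_sentence_ending speech_ending speech_start length_of_message
instance (all_sentence_ending : List Int) (speech_ending : List Int) (speech_start : List Int) (length_of_message : Int) (out : Option Int) : Decidable (Spec_position_of_next_line all_sentence_ending speech_ending speech_start length_of_message out) := by unfold Spec_position_of_next_line; infer_instance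

-- ===== CLAIM (what is proved, stated in full; the proofs are below) =====
def Claim_equal_position_of_next_line : Prop := ∀ (all_sentence_ending : List Int) (speech_ending : List Int) (speech_start : List Int) (length_of_message : Int), Dom_position_of_next_line all_sentence_ending speech_ending speech_start length_of_message → Spec_position_of_next_line all_sentence_ending speech_ending speech_start length_of_message (position_of_next_line all_sentence_ending speech_ending speech_start length_of_message)

-- ===== LEMMAS AND PROOFS =====

-- whether p lies inside some interval of P
def pvCov (P : List (Int × Int)) (p : Int) : Bool :=
  P.any (fun q => decide (q.1 ≤ p) && decide (p ≤ q.2))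

-- p qualifies: at/after the index and uncovered
def pvGood (P : List (Int × Int)) (L : Int) (p : Int) : Bool :=
  decide (L ≤ p) && !pvCov P p

def pvMergeO : Option Int → Option Int → Option Int
  | a, none => a
  | none, some b => some b
  | some a, some b => some (min a b)

-- minimum qualifying position of a list (none if there is none)
def pvMinQ (P : List (Int × Int)) (L : Int) : List Int → Option Int
  | [] => none
  | p :: l => if pvGood P L p then pvMergeO (some p) (pvMinQ P L l) else pvMinQ P L l

lemma pvMergeO_assoc (a b c : Option Int) :
    pvMergeO (pvMergeO a b) c = pvMergeO a (pvMergeO b c) := by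
  cases a <;> cases b <;> cases c <;> simp [pvMergeO, min_assoc]

-- A's fold step equals the mergeO step
lemma stepA_eq (P : List (Int × Int)) (L : Int) (c : Option Int) (p : Int) :
    (let in_speech := P.any (fun q => decide (q.1 ≤ p) && decide (p ≤ q.2))
     if in_speech then c
     else
       let d := p - L
       if (decide (0 ≤ d) &&
           (match c with
            | none => true
            | some c' => decide (d < c' - L))) then some p
       else c)
    = if pvGood P L p then pvMergeO c (some p) else c := by
  cases c <;> simp [pvGood, pvCov, pvMergeO] <;>
    by_cases h : P.any (fun q => decide (q.1 ≤ p) && decide (p ≤ q.2)) <;>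
      simp [h] <;> split_ifs <;> simp_all <;> omega

lemma foldl_step_eq (P : List (Int × Int)) (L : Int) :
    ∀ (l : List Int) (acc : Option Int),
      l.foldl (fun c p => if pvGood P L p then pvMergeO c (some p) else c) acc
        = pvMergeO acc (pvMinQ P L l) := by
  intro l
  induction l with
  | nil => intro acc; simp [pvMinQ, pvMergeO]
  | cons p l ih =>
    intro acc
    by_cases h : pvGood P L p = true
    · simp [List.foldl, h, ih, pvMinQ]
      rw [show pvMergeO (some p) (pvMinQ P L l) = pvMergeO (some p) (pvMinQ P L l) from rfl]
      rw [← pvMergeO_assoc]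
    · simp [List.foldl, h, ih, pvMinQ]

-- A computes the minimum qualifying position
lemma A_eq_minQ (all se ss : List Int) (L : Int) :
    position_of_next_line all se ss L = pvMinQ (List.zip ss se) L all := by
  unfold position_of_next_line
  have : (fun (closest : Option Int) (p : Int) =>
      let in_speech := (List.zip ss se).any (fun q => decide (q.1 ≤ p) && decide (p ≤ q.2))
      if in_speech then closest
      else
        let difference := p - L
        if (decide (0 ≤ difference) &&
            (match closest with
             | none => true
             | some c => decide (difference < c - L))) then some p
        else closest)
      = (fun c p => if pvGood (List.zip ss se) L p then pvMergeO c (some p) else c) := by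
    funext c p
    exact stepA_eq (List.zip ss se) L c p
  rw [this, foldl_step_eq]
  cases pvMinQ (List.zip ss se) L all <;> simp [pvMergeO]

-- minQ is invariant under permutation of the scanned list
lemma pvMinQ_perm (P : List (Int × Int)) (L : Int) {l₁ l₂ : List Int} (h : l₁.Perm l₂) :
    pvMinQ P L l₁ = pvMinQ P L l₂ := by
  induction h with
  | nil => rfl
  | cons x _ ih => simp [pvMinQ, ih]
  | swap x y l =>
    by_cases hx : pvGood P L x = true <;> by_cases hy : pvGood P L y = true <;>
      simp [pvMinQ, hx, hy, ← pvMergeO_assoc]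
    · cases pvMinQ P L l <;> simp [pvMergeO, min_comm, min_left_comm]
  | trans _ _ ih₁ ih₂ => exact ih₁.trans ih₂

-- minQ is invariant under permutation of the interval list
lemma pvMinQ_congr_P {P₁ P₂ : List (Int × Int)} (L : Int) (h : P₁.Perm P₂) (l : List Int) :
    pvMinQ P₁ L l = pvMinQ P₂ L l := by
  have hcov : ∀ p, pvCov P₁ p = pvCov P₂ p := by
    intro p
    unfold pvCov
    apply Bool.eq_iff_iff.mpr
    simp only [List.any_eq_true]
    constructor
    · rintro ⟨q, hq, hb⟩; exact ⟨q, h.mem_iff.mp hq, hb⟩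
    · rintro ⟨q, hq, hb⟩; exact ⟨q, h.mem_iff.mpr hq, hb⟩
  induction l with
  | nil => rfl
  | cons p l ih => simp [pvMinQ, pvGood, hcov, ih]

-- a value produced by pvMinQ is a member of the list
lemma pvMinQ_mem (P : List (Int × Int)) (L : Int) :
    ∀ (l : List Int) (m : Int), pvMinQ P L l = some m → m ∈ l := by
  intro l
  induction l with
  | nil => intro m h; simp [pvMinQ] at h
  | cons p l ih =>
    intro m h
    by_cases hg : pvGood P L p = true
    · simp [pvMinQ, hg] at h
      cases hq : pvMinQ P L l with
      | none => simp [hq, pvMergeO] at h; simp [h]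
      | some v =>
        simp [hq, pvMergeO] at h
        rcases min_cases p v with ⟨he, _⟩ | ⟨he, _⟩
        · rw [he] at h; simp [h]
        · rw [he] at h; subst h; exact List.mem_cons_of_mem _ (ih v hq)
    · simp [pvMinQ, hg] at h
      exact List.mem_cons_of_mem _ (ih m h)

-- running max of interval ends, continuing from an accumulator
def pvUpd : Option Int → Int → Option Int
  | none, e => some e
  | some me, e => if me < e then some e else some me

def pvMaxE (m : Option Int) : List (Int × Int) → Option Int
  | [] => m
  | q :: l => pvMaxE (pvUpd m q.2) l

lemma pvAdvance_spec (p : Int) :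
    ∀ (rest : List (Int × Int)) (m : Option Int),
      pvAdvance p rest m
        = (rest.dropWhile (fun q => decide (q.1 ≤ p)),
           pvMaxE m (rest.takeWhile (fun q => decide (q.1 ≤ p)))) := by
  intro rest
  induction rest with
  | nil => intro m; simp [pvAdvance, pvMaxE, List.dropWhile, List.takeWhile]
  | cons q rest ih =>
    intro m
    by_cases h : q.1 ≤ p
    · have hupd : (match m with
        | none => some q.2
        | some me => if me < q.2 then some q.2 else some me) = pvUpd m q.2 := by
        cases m <;> simp [pvUpd]
      simp [pvAdvance, h, List.dropWhile, List.takeWhile, ih, pvMaxE, hupd]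
    · simp [pvAdvance, h, List.dropWhile, List.takeWhile, pvMaxE]

lemma pvMaxE_append (m : Option Int) (a b : List (Int × Int)) :
    pvMaxE m (a ++ b) = pvMaxE (pvMaxE m a) b := by
  induction a generalizing m with
  | nil => simp [pvMaxE]
  | cons q a ih => simp [pvMaxE, ih]

-- characterization of the running max against a threshold p
lemma pvMaxE_iff (p : Int) :
    ∀ (l : List (Int × Int)) (m : Option Int),
      (∃ me, pvMaxE m l = some me ∧ p ≤ me)
        ↔ ((∃ q ∈ l, p ≤ q.2) ∨ (∃ me0, m = some me0 ∧ p ≤ me0)) := by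
  intro l
  induction l with
  | nil => intro m; simp [pvMaxE]
  | cons q l ih =>
    intro m
    rw [pvMaxE, ih]
    constructor
    · rintro (⟨r, hr, hpr⟩ | ⟨me0, hme0, hp⟩)
      · exact Or.inl ⟨r, List.mem_cons_of_mem _ hr, hpr⟩
      · cases m with
        | none =>
          simp [pvUpd] at hme0
          exact Or.inl ⟨q, List.mem_cons_self, by omega⟩
        | some me =>
          by_cases h : me < q.2 <;> simp [pvUpd, h] at hme0
          · subst hme0; exact Or.inl ⟨q, List.mem_cons_self, hp⟩
          · exact Or.inr ⟨me, rfl, by omega⟩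
    · rintro (⟨r, hr, hpr⟩ | ⟨me0, hme0, hp⟩)
      · rcases List.mem_cons.mp hr with h | h
        · subst h
          cases m with
          | none => exact Or.inr ⟨r.2, rfl, hpr⟩
          | some me =>
            by_cases hlt : me < r.2 <;> simp [pvUpd, hlt]
            · omega
            · omega
        · exact Or.inl ⟨r, h, hpr⟩
      · cases m with
        | none => simp at hme0
        | some me =>
          simp at hme0
          subst hme0
          by_cases hlt : me < q.2 <;> simp [pvUpd, hlt] <;> omega

-- after dropWhile on a start-sorted interval list, every remaining start exceeds p
lemma dropWhile_fst_gt (p : Int) :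
    ∀ {P : List (Int × Int)}, P.Pairwise (fun a b => a.1 ≤ b.1) →
      ∀ q ∈ P.dropWhile (fun q => decide (q.1 ≤ p)), p < q.1 := by
  intro P
  induction P with
  | nil => intro _ q hq; simp at hq
  | cons a P ih =>
    intro hpw q hq
    by_cases ha : a.1 ≤ p
    · rw [List.dropWhile_cons_of_pos (by simpa using ha)] at hq
      exact ih (List.Pairwise.of_cons hpw) q hq
    · rw [List.dropWhile_cons_of_neg (by simpa using ha)] at hq
      rcases List.mem_cons.mp hq with h | h
      · subst h; omega
      · have := (List.pairwise_cons.mp hpw).1 q h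
        omega

-- the main sweep invariant: rest is a suffix of the sorted interval list P,
-- max_end is the running max over the consumed prefix, and every consumed
-- start is ≤ every remaining newline
lemma pvSweep_eq (L : Int) (P : List (Int × Int))
    (hP : P.Pairwise (fun a b => a.1 ≤ b.1)) :
    ∀ (S : List Int) (done rest : List (Int × Int)),
      P = done ++ rest →
      S.Pairwise (· ≤ ·) →
      (∀ p ∈ S, ∀ q ∈ done, q.1 ≤ p) →
      pvSweep L S rest (pvMaxE none done) = pvMinQ P L S := by
  intro S
  induction S with
  | nil => intro done rest _ _ _; simp [pvSweep, pvMinQ]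
  | cons p ps ih =>
    intro done rest hsplit hS hdone
    have hps_pairwise := List.Pairwise.of_cons hS
    have hp_le : ∀ p' ∈ ps, p ≤ p' := fun p' hp' => (List.pairwise_cons.mp hS).1 p' hp'
    by_cases hL : p < L
    · -- skipped: not good (L ≤ p fails), state unchanged
      have hgood : pvGood P L p = false := by
        simp [pvGood]; omega
      rw [pvSweep]
      simp only [hL, if_pos]
      rw [pvMinQ, hgood]
      simp only [Bool.false_eq_true, if_false]
      exact ih done rest hsplit hps_pairwise
        (fun p' hp' q hq => hdone p' (List.mem_cons_of_mem _ hp') q hq)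
    · rw [pvSweep]
      simp only [hL, if_false]
      rw [pvAdvance_spec]
      set taken := rest.takeWhile (fun q => decide (q.1 ≤ p)) with htaken
      set rest' := rest.dropWhile (fun q => decide (q.1 ≤ p)) with hrest'
      have hsplit' : P = (done ++ taken) ++ rest' := by
        rw [hsplit, List.append_assoc, htaken, hrest', List.takeWhile_append_dropWhile]
      -- every element of done ++ taken has fst ≤ p; every element of rest' has fst > p
      have htaken_le : ∀ q ∈ taken, q.1 ≤ p := by
        intro q hq
        have := List.mem_takeWhile_imp hq
        simpa using this
      have hdone_le : ∀ q ∈ done, q.1 ≤ p := fun q hq => hdone p List.mem_cons_self q hq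
      have hrest_pw : rest.Pairwise (fun a b => a.1 ≤ b.1) :=
        (List.pairwise_append.mp (hsplit ▸ hP)).2.1
      have hrest'_gt : ∀ q ∈ rest', p < q.1 := by
        rw [hrest']
        exact dropWhile_fst_gt p hrest_pw
      -- the check condition decides coverage of p by P
      have hcovP : pvCov P p = true ↔ ∃ me, pvMaxE (pvMaxE none done) taken = some me ∧ p ≤ me := by
        rw [← pvMaxE_append, pvMaxE_iff]
        constructor
        · intro hc
          have hex : ∃ q ∈ P, q.1 ≤ p ∧ p ≤ q.2 := by
            simpa [pvCov, List.any_eq_true] using hc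
          rcases hex with ⟨q, hq, h1, h2⟩
          rw [hsplit'] at hq
          rcases List.mem_append.mp hq with h | h
          · exact Or.inl ⟨q, h, h2⟩
          · exact absurd (hrest'_gt q h) (by omega)
        · rintro (⟨q, hq, hp2⟩ | ⟨me0, hme0, _⟩)
          · have hq1 : q.1 ≤ p := by
              rcases List.mem_append.mp hq with h | h
              · exact hdone_le q h
              · exact htaken_le q h
            have hqP : q ∈ P := by rw [hsplit']; exact List.mem_append_left _ hq
            unfold pvCov
            rw [List.any_eq_true]
            exact ⟨q, hqP, by simp [hq1, hp2]⟩
          · simp at hme0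
      by_cases hc : pvCov P p = true
      · -- covered: not good, recurse with advanced state
        have hgood : pvGood P L p = false := by simp [pvGood, hc]
        rcases hcovP.mp hc with ⟨me, hme, hpme⟩
        rw [hme]
        have hdec : decide (me < p) = false := decide_eq_false (by omega)
        simp only [hdec, Bool.false_eq_true, if_false]
        rw [pvMinQ, hgood]
        simp only [Bool.false_eq_true, if_false]
        have := ih (done ++ taken) rest' hsplit' hps_pairwise
          (fun p' hp' q hq => by
            rcases List.mem_append.mp hq with h | h
            · exact le_trans (hdone_le q h) (hp_le p' hp')
            · exact le_trans (htaken_le q h) (hp_le p' hp'))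
        rw [pvMaxE_append, hme] at this
        exact this
      · -- uncovered: good, sweep returns p; show minQ is p too
        have hgood : pvGood P L p = true := by simp [pvGood, hc]; omega
        have hnone : ¬ ∃ me, pvMaxE (pvMaxE none done) taken = some me ∧ p ≤ me := by
          intro h; exact hc (hcovP.mpr h)
        have hcheck : (match pvMaxE (pvMaxE none done) taken with
            | none => true | some me => decide (me < p)) = true := by
          cases hme : pvMaxE (pvMaxE none done) taken with
          | none => rfl
          | some me =>
            simp only []
            by_contra hlt
            simp at hlt
            exact hnone ⟨me, hme, hlt⟩
        rw [hcheck]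
        simp only [if_true]
        rw [pvMinQ, hgood]
        simp only [if_true]
        cases hq : pvMinQ P L ps with
        | none => simp [pvMergeO]
        | some v =>
          have hv : p ≤ v := hp_le v (pvMinQ_mem P L ps v hq)
          simp [pvMergeO]
          omega

-- ===== VERDICT (by name: the statement is the Claim_ definition above) =====
theorem position_of_next_line_spec : Claim_equal_position_of_next_line := by
  intro all se ss L _
  unfold Spec_position_of_next_line position_of_next_line_alt
  rw [A_eq_minQ]
  have hperm_all : (PySem.List.sorted all (fun x => x) false).Perm all :=
    PySem.List.sorted_perm all (fun x => x) false
  have hperm_P : (PySem.List.sorted (List.zip ss se) (fun q => q.1) false).Perm (List.zip ss se) :=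
    PySem.List.sorted_perm (List.zip ss se) (fun q => q.1) false
  rw [pvMinQ_perm (List.zip ss se) L hperm_all.symm]
  rw [pvMinQ_congr_P L hperm_P.symm]
  rw [← pvSweep_eq L (PySem.List.sorted (List.zip ss se) (fun q => q.1) false)
        (PySem.List.sorted_pairwise (List.zip ss se) (fun q => q.1))
        (PySem.List.sorted all (fun x => x) false)
        [] (PySem.List.sorted (List.zip ss se) (fun q => q.1) false)
        rfl
        (by simpa using PySem.List.sorted_pairwise all (fun x => x))
        (by intro p _ q hq; simp at hq)]
  rfl
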